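-- pv_equiv track=rewrite | github.com/AlejoHer1820/LAB-2 | ultimo proyecto.py | get_dac_value
-- ===== SOURCE A (Python) =====
-- dac_rpm_data = [
--     (255, 4500, 5000),
--     (220, 4000, 4500),
--     (200, 3500, 4000),
--     (180, 3000, 3500),
--     (160, 2500, 3000),
--     (140, 2000, 2500),
--     (120, 1500, 2000),
--     (100, 1000, 1500),
--     (80, 500, 1000),
--     (50, 200, 500),
--     (30, 50, 200),
--     (0, 0, 50)
-- ]
--
-- def get_dac_value(target_rpm):
--     closest_dac = 0
--     min_distance = float('inf')
--     for dac, min_rpm, max_rpm in dac_rpm_data: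
--         if min_rpm <= target_rpm <= max_rpm:
--             return dac
--         distance = min(abs(target_rpm - min_rpm), abs(target_rpm - max_rpm))
--         if distance < min_distance:
--             min_distance = distance
--             closest_dac = dac
--     return closest_dac
-- ===== SOURCE B (Python) =====
-- dac_rpm_data = [
--     (255, 4500, 5000),
--     (220, 4000, 4500),
--     (200, 3500, 4000),
--     (180, 3000, 3500),
--     (160, 2500, 3000),
--     (140, 2000, 2500),
--     (120, 1500, 2000),
--     (100, 1000, 1500),
--     (80, 500, 1000),
--     (50, 200, 500),
--     (30, 50, 200),
--     (0, 0, 50)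
-- ]
--
-- def get_dac_value(target_rpm):
--     # pass 1: containment
--     for dac, lo, hi in dac_rpm_data:
--         if lo <= target_rpm <= hi:
--             return dac
--     # pass 2: nearest interval endpoint, earlier rows win ties
--     best_dac, best = 0, None
--     for dac, lo, hi in dac_rpm_data:
--         d = min(abs(target_rpm - lo), abs(target_rpm - hi))
--         if best is None or d < best:
--             best, best_dac = d, dac
--     return best_dac
-- ===== Notes on version B (the rewrite author's own statement) =====
-- stated objective: alternative
-- what changed: Splits A's single combined loop into two sequential passes: a containment scan that returns immediately, and a separate nearest-endpoint argmin scan used only as a fallback.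
import Mathlib
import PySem

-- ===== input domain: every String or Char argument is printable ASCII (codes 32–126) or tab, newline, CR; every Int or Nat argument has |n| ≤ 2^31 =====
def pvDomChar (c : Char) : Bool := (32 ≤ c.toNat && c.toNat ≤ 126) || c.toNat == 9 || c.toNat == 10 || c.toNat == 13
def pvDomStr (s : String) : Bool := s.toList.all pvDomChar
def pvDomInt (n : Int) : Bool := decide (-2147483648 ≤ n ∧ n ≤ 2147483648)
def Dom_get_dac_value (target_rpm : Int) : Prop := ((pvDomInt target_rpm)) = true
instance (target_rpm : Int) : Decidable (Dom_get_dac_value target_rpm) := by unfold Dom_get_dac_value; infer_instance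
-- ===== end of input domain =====

-- B splits A's single combined loop into two sequential passes (a containment scan, then a
-- separate nearest-endpoint argmin scan as fallback); same cost, different decomposition.

-- ===== PORT A =====
-- the module-level table dac_rpm_data, shared by both programs
def dacRpmData : List (Int × Int × Int) :=
  [(255, 4500, 5000), (220, 4000, 4500), (200, 3500, 4000), (180, 3000, 3500),
   (160, 2500, 3000), (140, 2000, 2500), (120, 1500, 2000), (100, 1000, 1500),
   (80, 500, 1000), (50, 200, 500), (30, 50, 200), (0, 0, 50)]

-- A's loop; min_distance is Option Int: none = float('inf') (exceeded by no int distance)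
def getDacLoopA : List (Int × Int × Int) → Int → Int → Option Int → Int
  | [], _, closest, _ => closest
  | (dac, mn, mx) :: rest, t, closest, md =>
    if mn ≤ t ∧ t ≤ mx then dac
    else
      let d := min |t - mn| |t - mx|
      if (match md with | none => true | some m => decide (d < m)) then
        getDacLoopA rest t dac (some d)
      else
        getDacLoopA rest t closest md

def get_dac_value (target_rpm : Int) : Int :=
  getDacLoopA dacRpmData target_rpm 0 none

-- ===== PORT B =====
-- pass 1: first interval containing target_rpm
def findIntervalB : List (Int × Int × Int) → Int → Option Int
  | [], _ => none
  | (dac, lo, hi) :: rest, t =>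
    if lo ≤ t ∧ t ≤ hi then some dac else findIntervalB rest t

-- pass 2: nearest-endpoint argmin, earlier rows win ties (best = none before the first row)
def nearestLoopB : List (Int × Int × Int) → Int → Int → Option Int → Int
  | [], _, best_dac, _ => best_dac
  | (dac, lo, hi) :: rest, t, best_dac, best =>
    let d := min |t - lo| |t - hi|
    match best with
    | none => nearestLoopB rest t dac (some d)
    | some m =>
        if d < m then nearestLoopB rest t dac (some d)
        else nearestLoopB rest t best_dac best

def get_dac_value_alt (target_rpm : Int) : Int :=
  match findIntervalB dacRpmData target_rpm with
  | some dac => dac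
  | none => nearestLoopB dacRpmData target_rpm 0 none

-- ===== PRECONDITION & SPEC =====
def Spec_get_dac_value (target_rpm : Int) (out : Int) : Prop := out = get_dac_value_alt target_rpm
instance (target_rpm : Int) (out : Int) : Decidable (Spec_get_dac_value target_rpm out) := by unfold Spec_get_dac_value; infer_instance

-- ===== CLAIM (what is proved, stated in full; the proofs are below) =====
def Claim_equal_get_dac_value : Prop := ∀ (target_rpm : Int), Dom_get_dac_value target_rpm → Spec_get_dac_value target_rpm (get_dac_value target_rpm)

-- ===== LEMMAS AND PROOFS =====

-- If some row contains t, A's combined loop returns the first such row's dac,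
-- independently of the accumulator state.
theorem loopA_of_find_some (l : List (Int × Int × Int)) (t : Int) (d : Int)
    (h : findIntervalB l t = some d) :
    ∀ (c : Int) (md : Option Int), getDacLoopA l t c md = d := by
  induction l with
  | nil => simp [findIntervalB] at h
  | cons row rest ih =>
    obtain ⟨dac, lo, hi⟩ := row
    intro c md
    by_cases hc : lo ≤ t ∧ t ≤ hi
    · simp [findIntervalB, hc] at h
      simp [getDacLoopA, hc, h]
    · simp [findIntervalB, hc] at h
      simp only [getDacLoopA, if_neg hc]
      cases md with
      | none => simpa using ih h _ _
      | some m => by_cases hd : min |t - lo| |t - hi| < m <;> simp [hd, ih h]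

-- If no row contains t, A's combined loop coincides with B's nearest-endpoint scan
-- from any common accumulator state.
theorem loopA_of_find_none (l : List (Int × Int × Int)) (t : Int)
    (h : findIntervalB l t = none) :
    ∀ (c : Int) (md : Option Int), getDacLoopA l t c md = nearestLoopB l t c md := by
  induction l with
  | nil => intro c md; rfl
  | cons row rest ih =>
    obtain ⟨dac, lo, hi⟩ := row
    intro c md
    have hc : ¬ (lo ≤ t ∧ t ≤ hi) := by
      intro hcc; simp [findIntervalB, hcc] at h
    have hrest : findIntervalB rest t = none := by
      simpa [findIntervalB, hc] using h
    simp only [getDacLoopA, nearestLoopB, if_neg hc]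
    cases md with
    | none => simpa using ih hrest _ _
    | some m =>
      by_cases hd : min |t - lo| |t - hi| < m <;>
        simp [hd, ih hrest]

-- ===== VERDICT (by name: the statement is the Claim_ definition above) =====
theorem get_dac_value_spec : Claim_equal_get_dac_value := by
  intro t _
  unfold Spec_get_dac_value get_dac_value get_dac_value_alt
  cases h : findIntervalB dacRpmData t with
  | some d => exact loopA_of_find_some _ _ _ h _ _
  | none => exact loopA_of_find_none _ _ h _ _
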